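-- pv_equiv track=rewrite | github.com/nathangeology/k8s_simulation_quick_v2 | python/kubesim/scale_invariant_scoring.py | _split_variants
-- ===== SOURCE A (Python) =====
-- def _split_variants(results: list[dict]) -> tuple[list[dict], list[dict]] | None:
--     """Split results into two variant groups. Returns None if < 2 variants."""
--     by_variant: dict[str, list[dict]] = {}
--     for r in results:
--         by_variant.setdefault(r.get("variant", ""), []).append(r)
--     if len(by_variant) < 2:
--         return None
--     groups = list(by_variant.values())
--     return groups[0], groups[1]
-- ===== SOURCE B (Python) =====
-- def _split_variants(results: list[dict]) -> tuple[list[dict], list[dict]] | None: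
--     """Split results into two variant groups. Returns None if < 2 variants."""
--     keys = list(dict.fromkeys(r.get("variant", "") for r in results))
--     if len(keys) < 2:
--         return None
--     k0, k1 = keys[0], keys[1]
--     return ([r for r in results if r.get("variant", "") == k0],
--             [r for r in results if r.get("variant", "") == k1])
-- ===== Notes on version B (the rewrite author's own statement) =====
-- stated objective: simpler
-- what changed: B computes the distinct variant keys once (ordered dedup) and then builds the two groups by two direct filters over the input, instead of accumulating every group in a dict of lists.
import Mathlib
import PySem

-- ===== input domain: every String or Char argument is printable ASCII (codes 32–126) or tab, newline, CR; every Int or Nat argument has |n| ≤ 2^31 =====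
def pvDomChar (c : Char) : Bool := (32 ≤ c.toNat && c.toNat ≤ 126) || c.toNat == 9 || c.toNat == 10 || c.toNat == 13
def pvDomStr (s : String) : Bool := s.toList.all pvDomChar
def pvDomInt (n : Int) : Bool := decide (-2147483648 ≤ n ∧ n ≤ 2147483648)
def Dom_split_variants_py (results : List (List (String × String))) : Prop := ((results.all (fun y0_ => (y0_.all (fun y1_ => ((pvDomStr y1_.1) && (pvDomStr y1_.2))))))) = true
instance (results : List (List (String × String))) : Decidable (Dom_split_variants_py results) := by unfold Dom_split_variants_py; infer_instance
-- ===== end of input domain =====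

-- B replaces A's dict-of-lists accumulation by one ordered dedup of the variant keys plus two direct filters (objective: simpler).

-- r.get("variant", "")
def pvKey (r : List (String × String)) : String := (PySem.Dict.mk r).getD "variant" ""

-- ===== PORT A =====
-- by_variant.setdefault(k, []).append(r)  ≡  d[k] = d.get(k, []) + [r]  = Dict.modify k [] (· ++ [r])
def split_variants_py (results : List (List (String × String))) : Option ((List (List (String × String))) × (List (List (String × String)))) :=
  let d := results.foldl (fun d r => d.modify (pvKey r) [] (· ++ [r])) PySem.Dict.empty
  if d.size < 2 then none
  else
    let groups := d.values
    some (PySem.List.pyGetD groups 0 [], PySem.List.pyGetD groups 1 [])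

-- ===== PORT B =====
def split_variants_py_alt (results : List (List (String × String))) : Option ((List (List (String × String))) × (List (List (String × String)))) :=
  let keys := PySem.List.dedup (results.map pvKey)
  if keys.length < 2 then none
  else
    let k0 := PySem.List.pyGetD keys 0 ""
    let k1 := PySem.List.pyGetD keys 1 ""
    some (results.filter (fun r => pvKey r == k0), results.filter (fun r => pvKey r == k1))

-- ===== PRECONDITION & SPEC =====
def Spec_split_variants_py (results : List (List (String × String))) (out : Option ((List (List (String × String))) × (List (List (String × String))))) : Prop := out = split_variants_py_alt results
instance (results : List (List (String × String))) (out : Option ((List (List (String × String))) × (List (List (String × String))))) : Decidable (Spec_split_variants_py results out) := by unfold Spec_split_variants_py; infer_instance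

-- ===== CLAIM (what is proved, stated in full; the proofs are below) =====
def Claim_equal_split_variants_py : Prop := ∀ (results : List (List (String × String))), Dom_split_variants_py results → Spec_split_variants_py results (split_variants_py results)

-- ===== LEMMAS AND PROOFS =====

-- A's accumulator, rewritten as a fold over (key, value) pairs so the PySem grouping lemmas apply.
theorem pvFold_eq_pairs (results : List (List (String × String))) :
    results.foldl (fun d r => d.modify (pvKey r) [] (· ++ [r])) PySem.Dict.empty
      = (results.map (fun r => (pvKey r, r))).foldl (fun d p => d.modify p.1 [] (· ++ [p.2])) PySem.Dict.empty := by
  rw [List.foldl_map]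

theorem pvKeys_eq (results : List (List (String × String))) :
    (results.foldl (fun d r => d.modify (pvKey r) [] (· ++ [r])) PySem.Dict.empty).keys
      = PySem.List.dedup (results.map pvKey) := by
  rw [PySem.Dict.keys_foldl_modify_key]
  simp [PySem.Dict.keys_empty, PySem.Set.update_nil_left]

theorem pvKeys_nodup (results : List (List (String × String))) :
    (results.foldl (fun d r => d.modify (pvKey r) [] (· ++ [r])) PySem.Dict.empty).keys.Nodup := by
  exact PySem.Dict.nodup_keys_foldl_modify_key _ _ _ _ _ (by simp [PySem.Dict.keys_empty])

theorem pvGetD_eq (results : List (List (String × String))) (k : String) :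
    (results.foldl (fun d r => d.modify (pvKey r) [] (· ++ [r])) PySem.Dict.empty).getD k []
      = results.filter (fun r => pvKey r == k) := by
  rw [pvFold_eq_pairs, PySem.Dict.getD_foldl_modify_append]
  simp [PySem.Dict.getD_empty, List.filter_map, Function.comp_def]

theorem pvValues_eq (results : List (List (String × String))) :
    (results.foldl (fun d r => d.modify (pvKey r) [] (· ++ [r])) PySem.Dict.empty).values
      = (PySem.List.dedup (results.map pvKey)).map (fun k => results.filter (fun r => pvKey r == k)) := by
  rw [PySem.Dict.values_eq_map_keys _ (pvKeys_nodup results) [], pvKeys_eq]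
  exact List.map_congr_left (fun k _ => pvGetD_eq results k)

theorem pvSize_eq (results : List (List (String × String))) :
    (results.foldl (fun d r => d.modify (pvKey r) [] (· ++ [r])) PySem.Dict.empty).size
      = (PySem.List.dedup (results.map pvKey)).length := by
  have := congrArg List.length (pvKeys_eq results)
  simpa [PySem.Dict.keys, PySem.Dict.size] using this

-- ===== VERDICT (by name: the statement is the Claim_ definition above) =====
theorem split_variants_py_spec : Claim_equal_split_variants_py := by
  intro results _
  unfold Spec_split_variants_py split_variants_py split_variants_py_alt
  simp only [pvSize_eq, pvValues_eq]
  rcases h : PySem.List.dedup (results.map pvKey) with _ | ⟨k0, _ | ⟨k1, rest⟩⟩ <;>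
    simp [PySem.List.pyGetD, PySem.List.pyGet?, PySem.List.pyIdx?,
      (by intro n; positivity : ∀ n : Nat, (0:Int) ≤ (n:Int) + 1)]
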